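-- pv_equiv track=rewrite | github.com/tgh561/AOIS | Lab_2/minimization/karnaugh.py | _mask_karnaugh_5
-- ===== SOURCE A (Python) =====
-- def _mask_karnaugh_5(rv, cv, e_val, nrow_bits, ncol_bits, e_index):
--     m = (e_val & 1) << e_index
--     for i in range(nrow_bits):
--         if (rv >> i) & 1:
--             m |= 1 << i
--     for j in range(ncol_bits):
--         if (cv >> j) & 1:
--             m |= 1 << (nrow_bits + j)
--     return m
-- ===== SOURCE B (Python) =====
-- def _mask_karnaugh_5(rv, cv, e_val, nrow_bits, ncol_bits, e_index):
--     row_mask = (1 << nrow_bits) - 1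
--     col_mask = (1 << ncol_bits) - 1
--     return ((e_val & 1) << e_index) | (rv & row_mask) | ((cv & col_mask) << nrow_bits)
-- ===== Notes on version B (the rewrite author's own statement) =====
-- stated objective: simpler
-- what changed: Replaced both bit-by-bit loops with a single closed-form expression: the row and column fields are extracted at once with (1<<n)-1 masks and OR'd into place with one shift each.
-- outside the precondition, e.g. on _mask_karnaugh_5(1, 1, 0, -1, 0, 0): A returns 0, B raises ValueError; on _mask_karnaugh_5(5, 3, 1, 2, -2, 1): A returns 3, B raises ValueError
import Mathlib
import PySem

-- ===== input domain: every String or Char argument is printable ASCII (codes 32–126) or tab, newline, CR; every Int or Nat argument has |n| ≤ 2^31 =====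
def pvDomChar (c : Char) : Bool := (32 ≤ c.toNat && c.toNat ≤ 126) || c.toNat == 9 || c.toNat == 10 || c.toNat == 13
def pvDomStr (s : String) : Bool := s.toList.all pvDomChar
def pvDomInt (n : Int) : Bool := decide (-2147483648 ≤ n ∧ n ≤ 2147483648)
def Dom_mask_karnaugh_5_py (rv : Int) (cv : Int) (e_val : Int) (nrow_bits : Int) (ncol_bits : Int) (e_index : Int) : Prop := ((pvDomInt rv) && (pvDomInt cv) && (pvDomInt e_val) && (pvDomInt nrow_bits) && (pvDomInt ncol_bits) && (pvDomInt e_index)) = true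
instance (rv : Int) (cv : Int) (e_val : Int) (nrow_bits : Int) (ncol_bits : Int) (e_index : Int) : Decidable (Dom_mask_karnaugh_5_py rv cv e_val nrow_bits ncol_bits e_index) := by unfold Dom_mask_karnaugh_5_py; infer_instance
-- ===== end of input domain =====

-- B replaces A's two bit-by-bit loops by one closed-form mask expression (objective: simpler).

-- ===== PORT A =====
def mask_karnaugh_5_py (rv : Int) (cv : Int) (e_val : Int) (nrow_bits : Int) (ncol_bits : Int) (e_index : Int) : Int :=
  let m0 := PySem.Int.band e_val 1 <<< e_index.toNat
  let m1 := (PySem.List.pyRange 0 nrow_bits 1).foldl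
    (fun m i => if PySem.Int.band (rv >>> i.toNat) 1 ≠ 0 then PySem.Int.bor m ((1 : Int) <<< i.toNat) else m) m0
  (PySem.List.pyRange 0 ncol_bits 1).foldl
    (fun m j => if PySem.Int.band (cv >>> j.toNat) 1 ≠ 0 then PySem.Int.bor m ((1 : Int) <<< (nrow_bits + j).toNat) else m) m1

-- ===== PORT B =====
def mask_karnaugh_5_py_alt (rv : Int) (cv : Int) (e_val : Int) (nrow_bits : Int) (ncol_bits : Int) (e_index : Int) : Int :=
  let row_mask := (1 : Int) <<< nrow_bits.toNat - 1
  let col_mask := (1 : Int) <<< ncol_bits.toNat - 1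
  PySem.Int.bor (PySem.Int.bor (PySem.Int.band e_val 1 <<< e_index.toNat) (PySem.Int.band rv row_mask))
    (PySem.Int.band cv col_mask <<< nrow_bits.toNat)

-- ===== PRECONDITION & SPEC =====
-- Pre_ restricts to the natural domain of non-negative bit counts and extra-bit index: for e_index < 0
-- A itself raises ValueError, and for negative nrow_bits/ncol_bits (outside the function's purpose) B's
-- (1 << n) raises ValueError while A's loops silently do nothing.
def Pre_mask_karnaugh_5_py (rv : Int) (cv : Int) (e_val : Int) (nrow_bits : Int) (ncol_bits : Int) (e_index : Int) : Prop :=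
  0 ≤ nrow_bits ∧ 0 ≤ ncol_bits ∧ 0 ≤ e_index
instance (rv : Int) (cv : Int) (e_val : Int) (nrow_bits : Int) (ncol_bits : Int) (e_index : Int) : Decidable (Pre_mask_karnaugh_5_py rv cv e_val nrow_bits ncol_bits e_index) := by unfold Pre_mask_karnaugh_5_py; infer_instance
def pvWitness_mask_karnaugh_5_py : Int × Int × Int × Int × Int × Int := (3, 2, 1, 2, 2, 4)

def Spec_mask_karnaugh_5_py (rv : Int) (cv : Int) (e_val : Int) (nrow_bits : Int) (ncol_bits : Int) (e_index : Int) (out : Int) : Prop := out = mask_karnaugh_5_py_alt rv cv e_val nrow_bits ncol_bits e_index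
instance (rv : Int) (cv : Int) (e_val : Int) (nrow_bits : Int) (ncol_bits : Int) (e_index : Int) (out : Int) : Decidable (Spec_mask_karnaugh_5_py rv cv e_val nrow_bits ncol_bits e_index out) := by unfold Spec_mask_karnaugh_5_py; infer_instance

-- ===== CLAIM (what is proved, stated in full; the proofs are below) =====
def Claim_equal_mask_karnaugh_5_py : Prop := ∀ (rv : Int) (cv : Int) (e_val : Int) (nrow_bits : Int) (ncol_bits : Int) (e_index : Int), Dom_mask_karnaugh_5_py rv cv e_val nrow_bits ncol_bits e_index → Pre_mask_karnaugh_5_py rv cv e_val nrow_bits ncol_bits e_index → Spec_mask_karnaugh_5_py rv cv e_val nrow_bits ncol_bits e_index (mask_karnaugh_5_py rv cv e_val nrow_bits ncol_bits e_index)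

-- ===== LEMMAS AND PROOFS =====

-- Python `x & 1` is `x mod 2` (mathematical, non-negative remainder).
theorem pv_band_one (a : Int) : PySem.Int.band a 1 = a % 2 := by
  rw [PySem.Int.band_one]
  show Int.fmod a 2 = a % 2
  rw [Int.fmod_eq_emod]
  simp

-- `1 << n` (Int-valued shift amount) is the natCast of the Nat power.
theorem pv_one_shl (n : Nat) : (1 : Int) <<< ((n : Nat) : Int) = ((2 ^ n : Nat) : Int) := by
  rw [Int.shiftLeft_eq_mul_pow, one_mul]

theorem pv_pow_cast (m : Nat) : ((2 : Int)) ^ m = ((2 ^ m : Nat) : Int) := by push_cast; ring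

-- emod of a negative integer -(k+1) by a positive Nat modulus.
theorem pv_negSucc_emod (k p : Nat) (hp : 0 < p) :
    (Int.negSucc k) % (p : Int) = (p : Int) - 1 - ((k % p : Nat) : Int) := by
  have hklt : k % p < p := Nat.mod_lt _ hp
  have hdm : (p : Int) * ((k / p : Nat) : Int) + ((k % p : Nat) : Int) = (k : Int) := by
    exact_mod_cast congrArg (fun x : Nat => (x : Int)) (Nat.div_add_mod k p)
  have key : (Int.negSucc k)
      = ((p : Int) - 1 - ((k % p : Nat) : Int)) + (p : Int) * (-((k / p : Nat) : Int) - 1) := by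
    rw [Int.negSucc_eq]
    push_cast at hdm ⊢
    linarith [hdm]
  rw [key, Int.add_mul_emod_self_left]
  exact Int.emod_eq_of_lt (by omega) (by omega)

-- peeling the top remainder bit: a mod 2P in terms of a mod P and the parity of a div P.
theorem pv_emod_double (a P : Int) (hP : 0 < P) :
    a % (2 * P) = a % P + P * ((a / P) % 2) := by
  have h1 : P * (a / P) + a % P = a := Int.mul_ediv_add_emod a P
  have h2 : 2 * ((a / P) / 2) + (a / P) % 2 = (a / P) := Int.mul_ediv_add_emod (a / P) 2
  have hr0 : 0 ≤ a % P := Int.emod_nonneg a (ne_of_gt hP)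
  have hr1 : a % P < P := Int.emod_lt_of_pos a hP
  have hb0 : 0 ≤ (a / P) % 2 := Int.emod_nonneg _ (by norm_num)
  have hb1 : (a / P) % 2 < 2 := Int.emod_lt_of_pos _ (by norm_num)
  have h3 : P * (a / P) = 2 * P * ((a / P) / 2) + P * ((a / P) % 2) := by
    calc P * (a / P) = P * (2 * ((a / P) / 2) + (a / P) % 2) := by rw [h2]
      _ = 2 * P * ((a / P) / 2) + P * ((a / P) % 2) := by ring
  have key : a = (P * ((a / P) % 2) + a % P) + 2 * P * ((a / P) / 2) := by
    linarith [h1, h3]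
  have hge : 0 ≤ P * ((a / P) % 2) + a % P := by
    have := mul_nonneg hP.le hb0
    linarith
  have hlt : P * ((a / P) % 2) + a % P < 2 * P := by
    have hble : (a / P) % 2 ≤ 1 := by omega
    have : P * ((a / P) % 2) ≤ P * 1 := mul_le_mul_of_nonneg_left hble hP.le
    linarith
  conv_lhs => rw [key]
  rw [Int.add_mul_emod_self_left, Int.emod_eq_of_lt hge hlt]
  ring

-- Python `a & ((1<<n)-1)` is `a mod 2^n`, for every integer a.
theorem pv_band_two_pow_sub_one (a : Int) (n : Nat) :
    PySem.Int.band a (((2 ^ n : Nat) : Int) - 1) = a % ((2 ^ n : Nat) : Int) := by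
  have h1 : (1 : Nat) ≤ 2 ^ n := Nat.one_le_two_pow
  have hcast : ((2 ^ n : Nat) : Int) - 1 = ((2 ^ n - 1 : Nat) : Int) := by
    push_cast [h1]; ring
  cases a with
  | ofNat m =>
      rw [hcast, show (Int.ofNat m) = ((m : Nat) : Int) from rfl, PySem.Int.band_natCast,
          Nat.and_two_pow_sub_one_eq_mod]
      push_cast; ring_nf
  | negSucc k =>
      rw [hcast]
      show PySem.Int.band _ _ = _
      rw [PySem.Int.band]
      rw [if_neg (by simp [Int.negSucc_not_nonneg]), if_pos (by positivity)]
      have hk : (-(Int.negSucc k) - 1 : Int) = (k : Int) := by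
        rw [Int.negSucc_eq]; ring
      rw [hk, Int.toNat_natCast, Int.toNat_natCast, Nat.land_comm,
          Nat.and_two_pow_sub_one_eq_mod,
          pv_negSucc_emod k (2 ^ n) (Nat.two_pow_pos _)]
      have h2 : k % 2 ^ n < 2 ^ n := Nat.mod_lt _ (Nat.two_pow_pos _)
      push_cast [Nat.cast_sub h1, Nat.cast_sub (by omega : k % 2 ^ n ≤ 2 ^ n - 1)]
      ring

-- low-bits invariant shared by the two loop lemmas below
theorem pv_emod_succ_pow (a : Int) (n : Nat) :
    a % ((2 ^ (n + 1) : Nat) : Int)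
      = a % ((2 ^ n : Nat) : Int) + ((2 ^ n : Nat) : Int) * ((a / ((2 ^ n : Nat) : Int)) % 2) := by
  have h : ((2 ^ (n + 1) : Nat) : Int) = 2 * ((2 ^ n : Nat) : Int) := by push_cast; ring
  rw [h, pv_emod_double a _ (by positivity)]

-- A's row loop ORs the low n bits of rv into the accumulator.
theorem pv_rowfold (rv : Int) (n : Nat) : ∀ (mn : Nat),
    (PySem.List.pyRange 0 ((n : Nat) : Int) 1).foldl
      (fun m i => if PySem.Int.band (rv >>> i.toNat) 1 ≠ 0 then PySem.Int.bor m ((1 : Int) <<< i.toNat) else m)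
      (mn : Int)
      = ((mn ||| (rv % ((2 ^ n : Nat) : Int)).toNat : Nat) : Int) := by
  induction n with
  | zero =>
      intro mn
      rw [show ((0 : Nat) : Int) = 0 from rfl, PySem.List.pyRange_one_eq_nil le_rfl]
      simp
  | succ n ih =>
      intro mn
      rw [show (((n + 1 : Nat)) : Int) = ((n : Nat) : Int) + 1 by push_cast; ring,
          PySem.List.pyRange_one_succ_right (by positivity), List.foldl_append, ih mn]
      have hrnn : 0 ≤ rv % ((2 ^ n : Nat) : Int) := Int.emod_nonneg _ (by positivity)
      set rn := (rv % ((2 ^ n : Nat) : Int)).toNat with hrn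
      have hr : rv % ((2 ^ n : Nat) : Int) = (rn : Int) := (Int.toNat_of_nonneg hrnn).symm
      have hlt : rn < 2 ^ n := by
        have := Int.emod_lt_of_pos rv (b := ((2 ^ n : Nat) : Int)) (by positivity)
        omega
      have hb : rv % ((2 ^ (n + 1) : Nat) : Int)
          = (rn : Int) + ((2 ^ n : Nat) : Int) * ((rv / ((2 ^ n : Nat) : Int)) % 2) := by
        rw [pv_emod_succ_pow, hr]
      have hbit0 : 0 ≤ (rv / ((2 ^ n : Nat) : Int)) % 2 := Int.emod_nonneg _ (by norm_num)
      have hbit2 : (rv / ((2 ^ n : Nat) : Int)) % 2 < 2 := Int.emod_lt_of_pos _ (by norm_num)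
      simp only [List.foldl_cons, List.foldl_nil, Int.toNat_natCast,
        Int.shiftRight_natCast_right, Int.shiftRight_eq_div_pow, pv_band_one, pv_one_shl]
      by_cases hc : (rv / ((2 ^ n : Nat) : Int)) % 2 = 0
      · rw [if_neg (not_not_intro hc)]
        have hx : rv % ((2 ^ (n + 1) : Nat) : Int) = (rn : Int) := by rw [hb, hc]; ring
        rw [hx, Int.toNat_natCast]
      · rw [if_pos hc]
        have hc1 : (rv / ((2 ^ n : Nat) : Int)) % 2 = 1 := by omega
        have hx : rv % ((2 ^ (n + 1) : Nat) : Int) = ((rn + 2 ^ n : Nat) : Int) := by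
          rw [hb, hc1]; push_cast; ring
        rw [hx, Int.toNat_natCast, PySem.Int.bor_natCast]
        congr 1
        rw [Nat.lor_assoc]
        congr 1
        have hdisj := Nat.two_pow_add_eq_or_of_lt (i := n) (b := rn) hlt 1
        rw [mul_one] at hdisj
        rw [Nat.lor_comm, ← hdisj]
        omega

-- A's column loop ORs the low n bits of cv, shifted up by N, into the accumulator.
theorem pv_colfold (cv : Int) (N : Nat) (n : Nat) : ∀ (mn : Nat),
    (PySem.List.pyRange 0 ((n : Nat) : Int) 1).foldl
      (fun m j => if PySem.Int.band (cv >>> j.toNat) 1 ≠ 0 then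
          PySem.Int.bor m ((1 : Int) <<< (((N : Nat) : Int) + j).toNat) else m)
      (mn : Int)
      = ((mn ||| ((cv % ((2 ^ n : Nat) : Int)).toNat <<< N) : Nat) : Int) := by
  induction n with
  | zero =>
      intro mn
      rw [show ((0 : Nat) : Int) = 0 from rfl, PySem.List.pyRange_one_eq_nil le_rfl]
      simp
  | succ n ih =>
      intro mn
      rw [show (((n + 1 : Nat)) : Int) = ((n : Nat) : Int) + 1 by push_cast; ring,
          PySem.List.pyRange_one_succ_right (by positivity), List.foldl_append, ih mn]
      have hrnn : 0 ≤ cv % ((2 ^ n : Nat) : Int) := Int.emod_nonneg _ (by positivity)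
      set rn := (cv % ((2 ^ n : Nat) : Int)).toNat with hrn
      have hr : cv % ((2 ^ n : Nat) : Int) = (rn : Int) := (Int.toNat_of_nonneg hrnn).symm
      have hlt : rn < 2 ^ n := by
        have := Int.emod_lt_of_pos cv (b := ((2 ^ n : Nat) : Int)) (by positivity)
        omega
      have hb : cv % ((2 ^ (n + 1) : Nat) : Int)
          = (rn : Int) + ((2 ^ n : Nat) : Int) * ((cv / ((2 ^ n : Nat) : Int)) % 2) := by
        rw [pv_emod_succ_pow, hr]
      have hbit0 : 0 ≤ (cv / ((2 ^ n : Nat) : Int)) % 2 := Int.emod_nonneg _ (by norm_num)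
      have hbit2 : (cv / ((2 ^ n : Nat) : Int)) % 2 < 2 := Int.emod_lt_of_pos _ (by norm_num)
      have haddn : (((N : Nat) : Int) + ((n : Nat) : Int)).toNat = ((N + n : Nat)) := by omega
      simp only [List.foldl_cons, List.foldl_nil, Int.toNat_natCast, haddn,
        Int.shiftRight_natCast_right, Int.shiftRight_eq_div_pow, pv_band_one,
        Int.shiftLeft_eq, one_mul, pv_pow_cast]
      by_cases hc : (cv / ((2 ^ n : Nat) : Int)) % 2 = 0
      · rw [if_neg (not_not_intro hc)]
        have hx : cv % ((2 ^ (n + 1) : Nat) : Int) = (rn : Int) := by rw [hb, hc]; ring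
        rw [hx, Int.toNat_natCast]
      · rw [if_pos hc]
        have hc1 : (cv / ((2 ^ n : Nat) : Int)) % 2 = 1 := by omega
        have hx : cv % ((2 ^ (n + 1) : Nat) : Int) = ((rn + 2 ^ n : Nat) : Int) := by
          rw [hb, hc1]; push_cast; ring
        rw [hx, Int.toNat_natCast, PySem.Int.bor_natCast]
        congr 1
        rw [Nat.lor_assoc]
        congr 1
        rw [Nat.shiftLeft_eq, Nat.shiftLeft_eq, Nat.add_mul, Nat.lor_comm]
        have hlt' : rn * 2 ^ N < 2 ^ (N + n) := by
          calc rn * 2 ^ N < 2 ^ n * 2 ^ N := (Nat.mul_lt_mul_right (Nat.two_pow_pos _)).mpr hlt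
            _ = 2 ^ (N + n) := by rw [← pow_add]; ring_nf
        have hdisj := Nat.two_pow_add_eq_or_of_lt (i := N + n) (b := rn * 2 ^ N) hlt' 1
        rw [mul_one] at hdisj
        rw [← hdisj, pow_add]
        ring

-- ===== VERDICT (by name: the statement is the Claim_ definition above) =====
theorem mask_karnaugh_5_py_spec : Claim_equal_mask_karnaugh_5_py := by
  intro rv cv e_val nrow_bits ncol_bits e_index _hdom hpre
  obtain ⟨hR, hC, hE⟩ := hpre
  obtain ⟨R, rfl⟩ := Int.eq_ofNat_of_zero_le hR
  obtain ⟨C, rfl⟩ := Int.eq_ofNat_of_zero_le hC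
  obtain ⟨E, rfl⟩ := Int.eq_ofNat_of_zero_le hE
  unfold Spec_mask_karnaugh_5_py mask_karnaugh_5_py mask_karnaugh_5_py_alt
  dsimp only
  rw [show (((R : Nat) : Int)).toNat = R from Int.toNat_natCast R,
      show (((C : Nat) : Int)).toNat = C from Int.toNat_natCast C,
      show (((E : Nat) : Int)).toNat = E from Int.toNat_natCast E]
  have hev : 0 ≤ e_val % 2 := Int.emod_nonneg _ (by norm_num)
  set t := (e_val % 2).toNat with ht
  have htc : e_val % 2 = ((t : Nat) : Int) := (Int.toNat_of_nonneg hev).symm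
  have hm0 : PySem.Int.band e_val 1 <<< E = ((t * 2 ^ E : Nat) : Int) := by
    simp only [Int.shiftLeft_eq, pv_band_one, htc]
    push_cast; ring
  have hmR : (1 : Int) <<< R - 1 = ((2 ^ R : Nat) : Int) - 1 := by
    simp only [Int.shiftLeft_eq, one_mul, pv_pow_cast]
  have hmC : (1 : Int) <<< C - 1 = ((2 ^ C : Nat) : Int) - 1 := by
    simp only [Int.shiftLeft_eq, one_mul, pv_pow_cast]
  have hrv : 0 ≤ rv % ((2 ^ R : Nat) : Int) := Int.emod_nonneg _ (by positivity)
  have hcv : 0 ≤ cv % ((2 ^ C : Nat) : Int) := Int.emod_nonneg _ (by positivity)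
  rw [hm0, pv_rowfold, pv_colfold, hmR, hmC,
      show PySem.Int.band rv (((2 ^ R : Nat) : Int) - 1) = (((rv % ((2 ^ R : Nat) : Int)).toNat : Nat) : Int) by
        rw [pv_band_two_pow_sub_one]; exact (Int.toNat_of_nonneg hrv).symm,
      show PySem.Int.band cv (((2 ^ C : Nat) : Int) - 1) = (((cv % ((2 ^ C : Nat) : Int)).toNat : Nat) : Int) by
        rw [pv_band_two_pow_sub_one]; exact (Int.toNat_of_nonneg hcv).symm,
      PySem.Int.bor_natCast]
  rw [Int.shiftLeft_eq, pv_pow_cast,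
      show (((cv % ((2 ^ C : Nat) : Int)).toNat : Nat) : Int) * ((2 ^ R : Nat) : Int)
        = (((cv % ((2 ^ C : Nat) : Int)).toNat * 2 ^ R : Nat) : Int) by push_cast; ring,
      PySem.Int.bor_natCast, Nat.shiftLeft_eq]
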